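-- pv_equiv track=rewrite | github.com/prernasrivastav/neetcode-submissions | Data Structures & Algorithms/append-characters-to-string-to-make-subsequence/submission-0.py | appendCharacters
-- ===== SOURCE A (Python) =====
-- def appendCharacters(s: str, t: str) -> int:
--     n, m = len(s), len(t)
--     store = [[n + 1] * 26 for _ in range(n)]
--     store[n - 1][ord(s[n - 1]) - ord('a')] = n - 1
--
--     for i in range(n - 2, -1, -1):
--         store[i] = store[i + 1][:]
--         store[i][ord(s[i]) - ord('a')] = i
--
--     i, j = 0, 0
--     while i < n and j < m:
--         if store[i][ord(t[j]) - ord('a')] == n + 1: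
--             break
--
--         i = store[i][ord(t[j]) - ord('a')] + 1
--         j += 1
--
--     return m - j
-- ===== SOURCE B (Python) =====
-- def appendCharacters(s: str, t: str) -> int:
--     j = 0
--     for ch in s:
--         if j < len(t) and ch == t[j]:
--             j += 1
--     return len(t) - j
-- ===== Notes on version B (the rewrite author's own statement) =====
-- stated objective: faster
-- what changed: Replaces A's per-position 26-entry next-occurrence table (built in a backward pass, then index-jumping) with a single greedy two-pointer scan of s matching t.
-- outside the precondition, e.g. on appendCharacters('', 'a'): A raises IndexError, B returns 1; on appendCharacters('z', '`'): A returns 0, B returns 1; on appendCharacters('ab', '{'): A raises IndexError, B returns 1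
import Mathlib
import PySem

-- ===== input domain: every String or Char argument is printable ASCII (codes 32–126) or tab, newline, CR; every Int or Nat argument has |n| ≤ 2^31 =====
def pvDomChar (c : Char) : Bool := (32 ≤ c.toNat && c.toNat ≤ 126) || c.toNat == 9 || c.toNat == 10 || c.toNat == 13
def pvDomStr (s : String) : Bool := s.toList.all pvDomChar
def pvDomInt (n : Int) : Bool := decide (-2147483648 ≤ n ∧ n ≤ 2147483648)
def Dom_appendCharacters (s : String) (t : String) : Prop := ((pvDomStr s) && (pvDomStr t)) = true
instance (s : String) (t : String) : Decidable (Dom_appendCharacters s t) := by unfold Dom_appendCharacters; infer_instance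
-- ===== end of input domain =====

-- B replaces A's per-position 26-entry next-occurrence table with a single greedy
-- two-pointer scan of s matching t (same return value on Pre_, less work and no table).


-- ===== PORT A =====
-- ord(c) - ord('a')  (an Int: Python's negative in-range index wraps, pySetD/pyGetD are exact)
def pvSlotI (c : Char) : Int := (c.toNat : Int) - 97

-- store = [[n + 1] * 26 for _ in range(n)]
def pvStore0 (sl : List Char) : List (List Int) :=
  List.replicate sl.length (List.replicate 26 ((sl.length : Int) + 1))

-- store[n - 1][ord(s[n - 1]) - ord('a')] = n - 1
def pvStore1 (sl : List Char) : List (List Int) :=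
  (pvStore0 sl).set (sl.length - 1)
    (PySem.List.pySetD ((pvStore0 sl).getD (sl.length - 1) [])
      (pvSlotI (sl.getD (sl.length - 1) 'a')) ((sl.length : Int) - 1))

-- for i in range(n - 2, -1, -1): store[i] = store[i + 1][:]; store[i][ord(s[i]) - ord('a')] = i
def pvStoreOf (sl : List Char) : List (List Int) :=
  (PySem.List.pyRange ((sl.length : Int) - 2) (-1) (-1)).foldl
    (fun st i =>
      st.set i.toNat (PySem.List.pySetD (st.getD (i.toNat + 1) []) (pvSlotI (sl.getD i.toNat 'a')) i))
    (pvStore1 sl)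

-- the while loop: jump i to the stored next occurrence + 1, advance j (at most m - j iterations)
def pvLoopA (store : List (List Int)) (tl : List Char) (n m : Nat) (i : Int) (j : Nat) : Nat :=
  if i < (n : Int) ∧ j < m then
    if PySem.List.pyGetD (store.getD i.toNat []) (pvSlotI (tl.getD j 'a')) 0 = (n : Int) + 1 then j
    else pvLoopA store tl n m
      (PySem.List.pyGetD (store.getD i.toNat []) (pvSlotI (tl.getD j 'a')) 0 + 1) (j + 1)
  else j
termination_by m - j
decreasing_by omega

def appendCharacters (s : String) (t : String) : Int :=
  (t.toList.length : Int) -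
    (pvLoopA (pvStoreOf s.toList) t.toList s.toList.length t.toList.length 0 0 : Int)

-- ===== PORT B =====
def appendCharacters_alt (s : String) (t : String) : Int :=
  (t.toList.length : Int) -
    ((s.toList.foldl
      (fun (j : Nat) c => if j < t.toList.length ∧ c = t.toList.getD j ' ' then j + 1 else j)
      0 : Nat) : Int)

-- ===== PRECONDITION & SPEC =====
-- Pre_ excludes the empty s (IndexError), non-lowercase characters in s, and any t whose
-- matching can reach a non-lowercase character (its lowercase prefix being a subsequence
-- of s with room to spare): there A raises IndexError or its negative table index
-- accidentally wraps ('G'..'`' act as 'g'..'z'); B does plain character matching there.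
def pvLower (c : Char) : Bool := "abcdefghijklmnopqrstuvwxyz".toList.contains c

def Pre_appendCharacters (s : String) (t : String) : Prop :=
  s ≠ "" ∧ s.toList.all pvLower = true ∧
    (t.toList.all pvLower = true ∨ ¬ (t.toList.takeWhile pvLower).Sublist s.toList ∨
      ¬ (t.toList.takeWhile pvLower).Sublist s.toList.dropLast)
instance (s : String) (t : String) : Decidable (Pre_appendCharacters s t) := by
  unfold Pre_appendCharacters; infer_instance

def pvWitness_appendCharacters : String × String := ("coaching", "coding")

def Spec_appendCharacters (s : String) (t : String) (out : Int) : Prop := out = appendCharacters_alt s t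
instance (s : String) (t : String) (out : Int) : Decidable (Spec_appendCharacters s t out) := by unfold Spec_appendCharacters; infer_instance

-- ===== CLAIM (what is proved, stated in full; the proofs are below) =====
def Claim_equal_appendCharacters : Prop := ∀ (s : String) (t : String), Dom_appendCharacters s t → Pre_appendCharacters s t → Spec_appendCharacters s t (appendCharacters s t)

-- ===== LEMMAS AND PROOFS =====

theorem pvLower_bounds (c : Char) (h : pvLower c = true) : 97 ≤ c.toNat ∧ c.toNat ≤ 122 := by
  simp [pvLower] at h
  rcases h with rfl|rfl|rfl|rfl|rfl|rfl|rfl|rfl|rfl|rfl|rfl|rfl|rfl|rfl|rfl|rfl|rfl|rfl|rfl|rfl|rfl|rfl|rfl|rfl|rfl|rfl <;> decide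

-- Nat form of the slot, and the bridge from the port's Int slot on lowercase chars
def pvSlot (c : Char) : Nat := c.toNat - 97

theorem pvSlotI_eq (c : Char) (h : 97 ≤ c.toNat) : pvSlotI c = ((pvSlot c : Nat) : Int) := by
  unfold pvSlotI pvSlot; omega

-- greedy subsequence-match count: how many leading chars of t get matched scanning l left to right
def pvG : List Char → List Char → Nat
  | _, [] => 0
  | [], _ :: _ => 0
  | c :: l', x :: t' => if c = x then 1 + pvG l' t' else pvG l' (x :: t')

-- first index ≥ i of c in sl, else n + 1 (the value A's table stores)
def pvNext (sl : List Char) (i : Nat) (c : Char) : Int :=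
  match (sl.drop i).idxOf? c with
  | some k => ((i + k : Nat) : Int)
  | none => (sl.length : Int) + 1

theorem pvG_nil_right (l : List Char) : pvG l [] = 0 := by cases l <;> rfl

theorem pvG_nil_left (t : List Char) : pvG [] t = 0 := by cases t <;> rfl

theorem pvG_not_mem (l t' : List Char) (x : Char) (h : x ∉ l) : pvG l (x :: t') = 0 := by
  induction l with
  | nil => rfl
  | cons c l' ih =>
    simp only [List.mem_cons, not_or] at h
    have hcx : c ≠ x := fun hcx => h.1 hcx.symm
    simp [pvG, hcx, ih h.2]

theorem pvG_skip (l t' : List Char) (x : Char) (k : Nat) (h : l.idxOf? x = some k) :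
    pvG l (x :: t') = 1 + pvG (l.drop (k + 1)) t' := by
  induction l generalizing k with
  | nil => simp [List.idxOf?] at h
  | cons c l' ih =>
    by_cases hc : c = x
    · subst hc
      simp [List.idxOf?_cons] at h
      simp [pvG, ← h]
    · rw [List.idxOf?_cons] at h
      simp only [beq_iff_eq, hc, if_false] at h
      obtain ⟨k', hk', rfl⟩ := Option.map_eq_some_iff.mp h
      simp [pvG, hc, ih k' hk']

theorem pvNext_step (sl : List Char) (i : Nat) (c : Char) (h : i < sl.length) :
    pvNext sl i c = if sl[i] = c then ((i : Nat) : Int) else pvNext sl (i + 1) c := by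
  unfold pvNext
  rw [List.drop_eq_getElem_cons h, List.idxOf?_cons]
  by_cases hc : sl[i] = c
  · simp [hc]
  · simp only [beq_iff_eq, hc, if_false]
    cases hk : (sl.drop (i + 1)).idxOf? c with
    | none => simp
    | some k => simp; omega

theorem pvNext_last (sl : List Char) (c : Char) (h : sl.length ≠ 0) :
    pvNext sl (sl.length - 1) c =
      if sl[sl.length - 1]'(by omega) = c then ((sl.length : Int) - 1) else (sl.length : Int) + 1 := by
  have hlt : sl.length - 1 < sl.length := by omega
  rw [pvNext_step sl _ c hlt]
  by_cases hc : sl[sl.length - 1]'hlt = c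
  · simp [hc]; omega
  · have heq : sl.length - 1 + 1 = sl.length := by omega
    simp only [hc, if_false, heq]
    unfold pvNext
    simp

theorem pvSlot_inj (c d : Char) (hc1 : 97 ≤ c.toNat) (hc2 : c.toNat ≤ 122)
    (hd1 : 97 ≤ d.toNat) (hd2 : d.toNat ≤ 122) (h : pvSlot c = pvSlot d) : c = d := by
  unfold pvSlot at h
  have : c.toNat = d.toNat := by omega
  exact Char.ext (UInt32.toNat_inj.mp this)

theorem pvSlot_lt (c : Char) (hc1 : 97 ≤ c.toNat) (hc2 : c.toNat ≤ 122) : pvSlot c < 26 := by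
  unfold pvSlot; omega

-- invariant of the backward building pass: rows lo..n-1 are correct (and 26 long)
def pvInv (sl : List Char) (st : List (List Int)) (lo : Nat) : Prop :=
  st.length = sl.length ∧
  ∀ i : Nat, lo ≤ i → i < sl.length →
    (st.getD i []).length = 26 ∧
    ∀ c : Char, 97 ≤ c.toNat → c.toNat ≤ 122 →
      (st.getD i []).getD (pvSlot c) 0 = pvNext sl i c

-- setting the slot of sl[i] in a correct row for position i+1 yields a correct row for i
theorem pvRow_set (sl : List Char) (row : List Int) (i : Nat) (hi : i < sl.length)
    (hlen : row.length = 26)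
    (hrow : ∀ c : Char, 97 ≤ c.toNat → c.toNat ≤ 122 →
      row.getD (pvSlot c) 0 = pvNext sl (i + 1) c)
    (hlc : 97 ≤ (sl[i]).toNat ∧ (sl[i]).toNat ≤ 122) :
    ∀ c : Char, 97 ≤ c.toNat → c.toNat ≤ 122 →
      (row.set (pvSlot sl[i]) ((i : Nat) : Int)).getD (pvSlot c) 0 = pvNext sl i c := by
  intro c hc1 hc2
  rw [pvNext_step sl i c hi]
  by_cases hc : sl[i] = c
  · rw [if_pos hc, hc]
    have := pvSlot_lt c hc1 hc2
    simp [List.getD, hlen, this]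
  · have hne : pvSlot sl[i] ≠ pvSlot c := fun h =>
      hc (pvSlot_inj _ _ hlc.1 hlc.2 hc1 hc2 h)
    rw [if_neg hc, ← hrow c hc1 hc2]
    simp [List.getD, hne]

-- the descending fold from k-1 down to 0 turns Inv k into Inv 0
theorem pvFoldDown (sl : List Char) (hlc : ∀ c ∈ sl, 97 ≤ c.toNat ∧ c.toNat ≤ 122) :
    ∀ (k : Nat), k < sl.length → ∀ st, pvInv sl st k →
      pvInv sl ((PySem.List.pyRange ((k : Int) - 1) (-1) (-1)).foldl
        (fun st i =>
          st.set i.toNat (PySem.List.pySetD (st.getD (i.toNat + 1) [])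
            (pvSlotI (sl.getD i.toNat 'a')) i))
        st) 0 := by
  intro k
  induction k with
  | zero =>
    intro _ st hst
    rw [PySem.List.pyRange_neg_one_eq_nil (by omega)]
    exact hst
  | succ k ih =>
    intro hk st hst
    have hcast : ((k + 1 : Nat) : Int) - 1 = (k : Int) := by push_cast; ring
    rw [hcast, PySem.List.pyRange_neg_one_cons (by omega), List.foldl_cons]
    apply ih (by omega)
    obtain ⟨hlen, hrows⟩ := hst
    have hkn : k < sl.length := by omega
    have hrowk1 := hrows (k + 1) (by omega) hk
    have hgetk : sl.getD k 'a' = sl[k] := List.getD_eq_getElem sl 'a' hkn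
    have hslk := hlc sl[k] (List.getElem_mem hkn)
    have htoNat : ((k : Int)).toNat = k := by omega
    have hslotk : pvSlotI (sl.getD k 'a') = ((pvSlot sl[k] : Nat) : Int) := by
      rw [hgetk]; exact pvSlotI_eq _ hslk.1
    constructor
    · simpa using hlen
    · intro i hge hilt
      rw [htoNat, hslotk, PySem.List.pySetD_natCast]
      by_cases hik : i = k
      · subst hik
        have hset : ((st.set i ((st.getD (i + 1) []).set (pvSlot sl[i]) (i : Int))).getD i [])
            = (st.getD (i + 1) []).set (pvSlot sl[i]) (i : Int) := by
          simp [List.getD, hlen, hilt]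
        rw [hset]
        exact ⟨by rw [List.length_set]; exact hrowk1.1, pvRow_set sl _ i hilt hrowk1.1 hrowk1.2 hslk⟩
      · have hne : k ≠ i := fun h => hik h.symm
        have hset : ((st.set k ((st.getD (k + 1) []).set (pvSlot sl[k]) (k : Int))).getD i [])
            = st.getD i [] := by simp [List.getD, hne]
        rw [hset]
        exact hrows i (by omega) hilt

-- the full table A builds is correct on every row
theorem pvStore_correct (sl : List Char) (hne : sl ≠ [])
    (hlc : ∀ c ∈ sl, 97 ≤ c.toNat ∧ c.toNat ≤ 122) : pvInv sl (pvStoreOf sl) 0 := by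
  have hn : 0 < sl.length := List.length_pos_iff.mpr hne
  unfold pvStoreOf
  have hrange : ((sl.length : Int) - 2) = (((sl.length - 1 : Nat) : Int)) - 1 := by omega
  rw [hrange]
  apply pvFoldDown sl hlc (sl.length - 1) (by omega)
  constructor
  · simp [pvStore1, pvStore0]
  · intro i hge hilt
    have hieq : i = sl.length - 1 := by omega
    subst hieq
    have hget0 : ((pvStore0 sl).getD (sl.length - 1) ([] : List Int))
        = List.replicate 26 ((sl.length : Int) + 1) := by
      unfold pvStore0
      exact List.getD_replicate _ (by omega)
    have hgetlast : sl.getD (sl.length - 1) 'a' = sl[sl.length - 1]'(by omega) :=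
      List.getD_eq_getElem sl 'a' (by omega)
    have hsllast := hlc (sl[sl.length - 1]'(by omega)) (List.getElem_mem (by omega))
    have hset : ((pvStore1 sl).getD (sl.length - 1) [])
        = (List.replicate 26 ((sl.length : Int) + 1)).set
            (pvSlot (sl[sl.length - 1]'(by omega))) ((sl.length : Int) - 1) := by
      unfold pvStore1
      rw [hget0, hgetlast, pvSlotI_eq _ hsllast.1, PySem.List.pySetD_natCast]
      simp [List.getD, pvStore0, hilt]
    rw [hset]
    refine ⟨by simp, ?_⟩
    intro c hc1 hc2
    rw [pvNext_last sl c (by omega)]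
    by_cases hc : sl[sl.length - 1]'(by omega) = c
    · rw [if_pos hc, hc]
      have := pvSlot_lt c hc1 hc2
      simp [List.getD, this]
    · have hneq : pvSlot (sl[sl.length - 1]'(by omega)) ≠ pvSlot c := fun h =>
        hc (pvSlot_inj _ _ hsllast.1 hsllast.2 hc1 hc2 h)
      rw [if_neg hc]
      have hlt26 := pvSlot_lt c hc1 hc2
      rw [List.getD, List.getElem?_set_ne hneq]
      rw [List.getElem?_replicate_of_lt hlt26]
      rfl

theorem pvG_le (l t : List Char) : pvG l t ≤ t.length := by
  induction l generalizing t with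
  | nil => rw [pvG_nil_left]; omega
  | cons c l' ih =>
    cases t with
    | nil => rw [pvG_nil_right]; omega
    | cons x t' =>
      by_cases hc : c = x
      · simp only [pvG, if_pos hc, List.length_cons]
        have := ih t'
        omega
      · simp only [pvG, if_neg hc]
        exact le_trans (ih (x :: t')) le_rfl

-- greedy soundness: if the scan matches all of t, then t is a subsequence of l
theorem pvG_complete (l t : List Char) (h : pvG l t = t.length) : t.Sublist l := by
  induction l generalizing t with
  | nil =>
    rw [pvG_nil_left] at h
    have : t = [] := List.eq_nil_of_length_eq_zero h.symm
    simp [this]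
  | cons c l' ih =>
    cases t with
    | nil => simp
    | cons x t' =>
      by_cases hc : c = x
      · simp only [pvG, if_pos hc, List.length_cons] at h
        subst hc
        exact List.Sublist.cons₂ c (ih t' (by omega))
      · simp only [pvG, if_neg hc] at h
        exact List.Sublist.cons c (ih (x :: t') h)

-- if the scan stalls inside t', anything appended after t' is never looked at
theorem pvG_append_stall (l t' rest : List Char) (h : pvG l t' < t'.length) :
    pvG l (t' ++ rest) = pvG l t' := by
  induction l generalizing t' with
  | nil => rw [pvG_nil_left, pvG_nil_left]
  | cons c l' ih =>
    cases t' with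
    | nil => simp [pvG_nil_right] at h
    | cons x ts =>
      by_cases hc : c = x
      · simp only [pvG, List.cons_append, if_pos hc, List.length_cons] at *
        have := ih ts (by omega)
        omega
      · simp only [pvG, List.cons_append, if_neg hc, List.length_cons] at *
        exact ih (x :: ts) h

-- the greedy scan only ever matches a prefix of t that is a subsequence of l
theorem pvG_take_sublist (l t : List Char) : (t.take (pvG l t)).Sublist l := by
  induction l generalizing t with
  | nil => rw [pvG_nil_left]; simp
  | cons c l' ih =>
    cases t with
    | nil => rw [pvG_nil_right]; simp
    | cons x t' =>
      by_cases hc : c = x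
      · subst hc
        have hGc : pvG (c :: l') (c :: t') = 1 + pvG l' t' := by simp [pvG]
        rw [hGc, Nat.add_comm, List.take_succ_cons]
        exact List.Sublist.cons₂ c (ih t')
      · simp only [pvG, if_neg hc]
        exact (ih (x :: t')).cons c

-- a subsequence with one extra element fits without the last element
theorem pvSublist_dropLast (M : List Char) (c : Char) (l : List Char)
    (h : (M ++ [c]).Sublist l) : M.Sublist l.dropLast := by
  induction l generalizing M with
  | nil => simp at h
  | cons a l' ih =>
    rcases List.sublist_cons_iff.mp h with h' | ⟨r, hr, hrs⟩
    · have hM := ih M h'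
      cases l' with
      | nil => simp at h'
      | cons b l'' => exact hM.cons a
    · cases M with
      | nil => simp
      | cons m M' =>
        injection hr with hm hM'
        subst hm
        rw [← hM'] at hrs
        have hM := ih M' hrs
        cases l' with
        | nil => simp at hrs
        | cons b l'' =>
          rw [List.dropLast_cons_of_ne_nil (by simp)]
          exact hM.cons₂ m

-- the last-but-one commutation used in the loop invariant transfer
theorem pvDropLast_drop (l : List Char) (m : Nat) :
    (l.drop m).dropLast = l.dropLast.drop m := by
  rw [List.dropLast_eq_take, List.dropLast_eq_take, List.drop_take, List.length_drop]
  congr 1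
  omega

-- A's jump loop computes exactly the greedy match count on the suffixes
theorem pvLoopA_eq (sl tl : List Char) (store : List (List Int))
    (hst : pvInv sl store 0) :
    ∀ (d j i : Nat),
      (∀ k (hk : k < tl.length), j ≤ k → k ≤ j + pvG (sl.drop i) (tl.drop j) →
        (97 ≤ (tl[k]'hk).toNat ∧ (tl[k]'hk).toNat ≤ 122) ∨
        (k = j + pvG (sl.drop i) (tl.drop j) ∧
          (¬ ((tl.drop j).take (pvG (sl.drop i) (tl.drop j))).Sublist ((sl.drop i).dropLast) ∨
            sl.drop i = []))) →
      tl.length - j ≤ d → i ≤ sl.length → j ≤ tl.length →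
      pvLoopA store tl sl.length tl.length (i : Int) j = j + pvG (sl.drop i) (tl.drop j) := by
  intro d
  induction d with
  | zero =>
    intro j i _ hd hi hj
    have hjm : j = tl.length := by omega
    rw [pvLoopA]
    simp [hjm, pvG_nil_right]
  | succ d ih =>
    intro j i hlow hd hi hj
    rw [pvLoopA]
    by_cases hcond : (i : Int) < (sl.length : Int) ∧ j < tl.length
    · rw [if_pos hcond]
      have hin : i < sl.length := by exact_mod_cast hcond.1
      have hjm : j < tl.length := hcond.2
      have hgetj : tl.getD j 'a' = tl[j] := List.getD_eq_getElem tl 'a' hjm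
      have hdropne : sl.drop i ≠ [] := by
        intro hnil
        have := congrArg List.length hnil
        rw [List.length_drop] at this
        simp at this
        omega
      have htlclc : 97 ≤ (tl[j]).toNat ∧ (tl[j]).toNat ≤ 122 := by
        rcases hlow j hjm le_rfl (by omega) with h | ⟨hkend, hor⟩
        · exact h
        · have hg0 : pvG (sl.drop i) (tl.drop j) = 0 := by omega
          rcases hor with hnsub | hnil
          · rw [hg0] at hnsub
            simp at hnsub
          · exact absurd hnil hdropne
      have htoNat : ((i : Int)).toNat = i := by omega
      have hval : PySem.List.pyGetD (store.getD ((i : Int)).toNat []) (pvSlotI (tl.getD j 'a')) 0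
          = pvNext sl i tl[j] := by
        rw [htoNat, hgetj, pvSlotI_eq _ htlclc.1, PySem.List.pyGetD_natCast]
        exact (hst.2 i (Nat.zero_le i) hin).2 tl[j] htlclc.1 htlclc.2
      have hdropj : tl.drop j = tl[j] :: tl.drop (j + 1) := List.drop_eq_getElem_cons hjm
      cases hidx : (sl.drop i).idxOf? tl[j] with
      | none =>
        have hvn : pvNext sl i tl[j] = (sl.length : Int) + 1 := by unfold pvNext; rw [hidx]
        rw [hval, hvn, if_pos rfl]
        have hnm : tl[j] ∉ sl.drop i := List.idxOf?_eq_none_iff.mp hidx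
        rw [hdropj, pvG_not_mem _ _ _ hnm]
        omega
      | some k =>
        have hklt : k < (sl.drop i).length := by
          obtain ⟨h1, _, _⟩ := List.idxOf?_eq_some_iff.mp hidx
          exact h1
        rw [List.length_drop] at hklt
        have hvn : pvNext sl i tl[j] = ((i + k : Nat) : Int) := by unfold pvNext; rw [hidx]
        rw [hval, hvn]
        have hneq : ((i + k : Nat) : Int) ≠ (sl.length : Int) + 1 := by
          push_cast; omega
        rw [if_neg hneq]
        have hG : pvG (sl.drop i) (tl.drop j)
            = 1 + pvG (sl.drop (i + k + 1)) (tl.drop (j + 1)) := by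
          rw [hdropj, pvG_skip _ _ _ k hidx, List.drop_drop]
          have : i + (k + 1) = i + k + 1 := by omega
          rw [this]
        have hgetk : (sl.drop i)[k]'(by rw [List.length_drop]; omega) = tl[j] := by
          obtain ⟨h1, h2, _⟩ := List.idxOf?_eq_some_iff.mp hidx
          exact h2
        have hlow' : ∀ k' (hk' : k' < tl.length), j + 1 ≤ k' →
            k' ≤ (j + 1) + pvG (sl.drop (i + k + 1)) (tl.drop (j + 1)) →
            (97 ≤ (tl[k']'hk').toNat ∧ (tl[k']'hk').toNat ≤ 122) ∨
            (k' = (j + 1) + pvG (sl.drop (i + k + 1)) (tl.drop (j + 1)) ∧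
              (¬ ((tl.drop (j + 1)).take (pvG (sl.drop (i + k + 1)) (tl.drop (j + 1)))).Sublist
                  ((sl.drop (i + k + 1)).dropLast) ∨ sl.drop (i + k + 1) = [])) := by
          intro k' hk' hge' hle'
          rcases hlow k' hk' (by omega) (by omega) with h | ⟨hkend, hor⟩
          · exact Or.inl h
          · refine Or.inr ⟨by omega, ?_⟩
            by_cases hnew : sl.drop (i + k + 1) = []
            · exact Or.inr hnew
            · refine Or.inl fun hsub' => ?_
              rcases hor with hnsub | hnil
              · apply hnsub
                have hgeq : pvG (sl.drop i) (tl.drop j)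
                    = pvG (sl.drop (i + k + 1)) (tl.drop (j + 1)) + 1 := by omega
                rw [hgeq, hdropj, List.take_succ_cons]
                have hik1n : i + k + 1 < sl.length := by
                  by_contra hge2
                  exact hnew (List.drop_eq_nil_of_le (by omega))
                have hkL : k < ((sl.drop i).dropLast).length := by
                  rw [List.length_dropLast, List.length_drop]
                  omega
                have hLk : ((sl.drop i).dropLast)[k]'hkL = tl[j] := by
                  rw [List.getElem_dropLast]
                  exact hgetk
                have hcomm : (sl.drop i).dropLast.drop (k + 1)
                    = (sl.drop (i + k + 1)).dropLast := by
                  rw [← pvDropLast_drop, List.drop_drop]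
                  congr 2

                have hstep : (sl.drop i).dropLast.drop k
                    = tl[j] :: (sl.drop i).dropLast.drop (k + 1) := by
                  rw [List.drop_eq_getElem_cons hkL, hLk]
                have hfit : (tl[j] :: (tl.drop (j + 1)).take
                      (pvG (sl.drop (i + k + 1)) (tl.drop (j + 1)))).Sublist
                    ((sl.drop i).dropLast.drop k) := by
                  rw [hstep, hcomm]
                  exact List.Sublist.cons₂ _ hsub'
                exact hfit.trans (List.drop_sublist k _)
              · exact absurd hnil hdropne
        have hcast : ((i + k : Nat) : Int) + 1 = ((i + k + 1 : Nat) : Int) := by push_cast; ring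
        rw [hcast, ih (j + 1) (i + k + 1) hlow' (by omega) (by omega) (by omega)]
        rw [hG]
        omega
    · rw [if_neg hcond]
      by_cases hjm : j = tl.length
      · simp [hjm, pvG_nil_right]
      · have hin : i = sl.length := by
          rcases not_and_or.mp hcond with h | h
          · have : ¬ ((i : Int) < (sl.length : Int)) := h
            omega
          · omega
        have hjlt : j < tl.length := by omega
        rw [hin, List.drop_length, List.drop_eq_getElem_cons hjlt, pvG_nil_left]
        omega
  
-- B's fold computes the same greedy match count
theorem pvFoldB_eq (tl : List Char) :
    ∀ (l : List Char) (j0 : Nat), j0 ≤ tl.length →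
      l.foldl (fun j c => if j < tl.length ∧ c = tl.getD j ' ' then j + 1 else j) j0
        = j0 + pvG l (tl.drop j0) := by
  intro l
  induction l with
  | nil => intro j0 _; simp [pvG_nil_left]
  | cons c l' ih =>
    intro j0 hj0
    by_cases hjm : j0 = tl.length
    · have hfalse : ¬ (j0 < tl.length ∧ c = tl.getD j0 ' ') := by omega
      rw [List.foldl_cons, if_neg hfalse, ih j0 hj0]
      simp [hjm, pvG_nil_right]
    · have hjlt : j0 < tl.length := by omega
      have hgetj : tl.getD j0 ' ' = tl[j0] := List.getD_eq_getElem tl ' ' hjlt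
      have hdropj : tl.drop j0 = tl[j0] :: tl.drop (j0 + 1) := List.drop_eq_getElem_cons hjlt
      by_cases hc : c = tl[j0]
      · have htrue : j0 < tl.length ∧ c = tl.getD j0 ' ' := ⟨hjlt, by rw [hgetj]; exact hc⟩
        rw [List.foldl_cons, if_pos htrue, ih (j0 + 1) (by omega)]
        rw [hdropj]
        simp [pvG, hc]
        omega
      · have hfalse : ¬ (j0 < tl.length ∧ c = tl.getD j0 ' ') := by
          rw [hgetj]; tauto
        rw [List.foldl_cons, if_neg hfalse, ih j0 hj0, hdropj]
        simp [pvG, hc, ← hdropj]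

-- ===== VERDICT (by name: the statement is the Claim_ definition above) =====
theorem appendCharacters_spec : Claim_equal_appendCharacters := by
  intro s t _ hpre
  obtain ⟨hne, hls', hlt'⟩ := hpre
  have hls : ∀ c ∈ s.toList, 97 ≤ c.toNat ∧ c.toNat ≤ 122 := fun c hc =>
    pvLower_bounds c (List.all_eq_true.mp hls' c hc)
  have hsl : s.toList ≠ [] := by
    simpa [String.toList_eq_nil_iff] using hne
  have hlow : ∀ k (hk : k < t.toList.length), 0 ≤ k →
      k ≤ 0 + pvG (s.toList.drop 0) (t.toList.drop 0) →
      (97 ≤ (t.toList[k]'hk).toNat ∧ (t.toList[k]'hk).toNat ≤ 122) ∨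
      (k = 0 + pvG (s.toList.drop 0) (t.toList.drop 0) ∧
        (¬ ((t.toList.drop 0).take (pvG (s.toList.drop 0) (t.toList.drop 0))).Sublist
            ((s.toList.drop 0).dropLast) ∨ s.toList.drop 0 = [])) := by
    by_cases hall : t.toList.all pvLower = true
    · intro k hk _ _
      exact Or.inl (pvLower_bounds _ (List.all_eq_true.mp hall _ (List.getElem_mem hk)))
    · -- t has a non-lowercase character, so its lowercase prefix is proper
      set tpre := t.toList.takeWhile pvLower with htpre
      have hdecomp : tpre ++ t.toList.dropWhile pvLower = t.toList :=
        List.takeWhile_append_dropWhile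
      have hjunk : t.toList.dropWhile pvLower ≠ [] := by
        intro hnil
        apply hall
        rw [List.all_eq_true]
        intro c hc
        rw [← hdecomp, hnil, List.append_nil] at hc
        exact List.mem_takeWhile_imp hc
      have hpref : tpre <+: t.toList := List.takeWhile_prefix pvLower
      have hlowpre : ∀ k (hk : k < t.toList.length), k < tpre.length →
          97 ≤ (t.toList[k]'hk).toNat ∧ (t.toList[k]'hk).toNat ≤ 122 := by
        intro k hk hkpre
        have hget : tpre[k]'hkpre = t.toList[k]'hk := hpref.getElem hkpre
        apply pvLower_bounds
        rw [← hget]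
        exact List.mem_takeWhile_imp (List.getElem_mem hkpre)
      rcases hlt' with hall' | hstall | hend
      · exact absurd hall' hall
      · -- the lowercase prefix is not a subsequence of s: the scan stalls inside it
        intro k hk _ hle
        simp only [List.drop_zero, Nat.zero_add] at hle
        have hGne : pvG s.toList tpre ≠ tpre.length := fun h =>
          hstall (pvG_complete s.toList tpre h)
        have hGlt : pvG s.toList tpre < tpre.length :=
          lt_of_le_of_ne (pvG_le s.toList tpre) hGne
        have hGeq : pvG s.toList t.toList = pvG s.toList tpre := by
          rw [← hdecomp]
          exact pvG_append_stall s.toList tpre _ hGlt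
        rw [hGeq] at hle
        exact Or.inl (hlowpre k hk (by omega))
      · -- prefix fits only up to the very last char of s: the loop exits with i = n
        obtain ⟨c0, junk', hj⟩ := List.exists_cons_of_ne_nil hjunk
        have htl : t.toList = tpre ++ c0 :: junk' := by rw [← hdecomp, hj]
        have hGle : pvG s.toList t.toList ≤ tpre.length := by
          by_contra hgt
          apply hend
          have htake1 : t.toList.take (tpre.length + 1) = tpre ++ [c0] := by
            rw [htl, List.take_append]
            congr 1
            · exact List.take_of_length_le (by omega)
            · rw [Nat.add_sub_cancel_left]
              rfl
          have hsub : (t.toList.take (tpre.length + 1)).Sublist s.toList :=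
            (List.take_sublist_take_left (by omega)).trans (pvG_take_sublist s.toList t.toList)
          rw [htake1] at hsub
          exact pvSublist_dropLast tpre c0 s.toList hsub
        intro k hk _ hle
        simp only [List.drop_zero, Nat.zero_add] at hle
        by_cases hkpre : k < tpre.length
        · exact Or.inl (hlowpre k hk hkpre)
        · -- k = pvG s t = tpre.length: use the no-room-to-spare disjunct
          have hkeq : k = pvG s.toList t.toList := by omega
          have hGeqpre : pvG s.toList t.toList = tpre.length := by omega
          refine Or.inr ⟨by simpa using hkeq, Or.inl ?_⟩
          simp only [List.drop_zero]
          rw [hGeqpre, htl, List.take_append, List.take_of_length_le (le_refl _),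
            Nat.sub_self, List.take_zero, List.append_nil]
          exact hend
  unfold Spec_appendCharacters appendCharacters appendCharacters_alt
  have hA := pvLoopA_eq s.toList t.toList (pvStoreOf s.toList)
    (pvStore_correct s.toList hsl hls) t.toList.length 0 0 hlow (by omega) (by omega) (by omega)
  have hB := pvFoldB_eq t.toList s.toList 0 (by omega)
  simp only [Nat.cast_zero, List.drop_zero, zero_add] at hA hB
  rw [hA, hB]
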